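-- pv_equiv track=rewrite | github.com/LilaShiba/2020_lessons | algorithms/cycles.py | find_all_in_cycle
-- ===== SOURCE A (Python) =====
-- def find_bridges(graph):
--     visited = {v:False for v in graph}
--     low = {v:-1 for v in graph}
--     reach = {v:-1 for v in graph}
--     depth = 0
--     edges = []
--     for vertex in graph:
--         if not visited[vertex]:
--             dfs(graph, vertex, vertex, visited, low, reach, edges, depth)
--     return edges
--
-- def dfs(graph, u, v, visited, low, reach, edges, depth):
--     visited[v] = True
--     low[v] = depth
--     reach[v] = depth
--
--     for edge in graph[v]:
--         if edge != u:
--             if visited[edge]: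
--                 low[v] = min(low[v], reach[edge])
--             else:
--                 dfs(graph, v, edge, visited, low, reach, edges, depth+1)
--                 low[v] = min(low[v], low[edge])
--                 if low[edge] > reach[v]:
--                     edges.append(edge)
--
-- def find_all_in_cycle(graph):
--     edges = find_bridges(graph)
--     cycles = graph.keys() - edges
--     true_cycles = []
--     for x in cycles:
--         if len(graph[x]) > 0:
--             true_cycles.append(x)
--
--     return true_cycles
-- ===== SOURCE B (Python) =====
-- def find_all_in_cycle(graph):
--     visited = {v: False for v in graph}
--     low = {v: -1 for v in graph}
--     reach = {v: -1 for v in graph}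
--     cycles = set(graph)
--     bridges = []
--     for root in graph:
--         if visited[root]:
--             continue
--         visited[root] = True
--         low[root] = reach[root] = 0
--         stack = [(root, root, 0, 0)]
--         while stack:
--             v, u, depth, i = stack.pop()
--             nbrs = graph[v]
--             if i < len(nbrs):
--                 stack.append((v, u, depth, i + 1))
--                 w = nbrs[i]
--                 if w == u:
--                     continue
--                 if visited[w]:
--                     low[v] = min(low[v], reach[w])
--                 else:
--                     visited[w] = True
--                     low[w] = reach[w] = depth + 1
--                     stack.append((w, v, depth + 1, 0))
--             elif stack:
--                 p = stack[-1][0]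
--                 low[p] = min(low[p], low[v])
--                 if low[v] > reach[p]:
--                     bridges.append(v)
--
--     cycles.difference_update(bridges)
--     return [x for x in cycles if len(graph[x]) > 0]
-- ===== Notes on version B (the rewrite author's own statement) =====
-- stated objective: alternative
-- what changed: The recursive dfs/find_bridges pair is replaced by a single function running an iterative DFS over an explicit stack of (vertex, parent, depth, neighbor-index) frames with the low/reach updates done at frame push/pop; the cycle set is built up front from the keys and pruned with difference_update, and the final filter is a list comprehension.
import Mathlib
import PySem

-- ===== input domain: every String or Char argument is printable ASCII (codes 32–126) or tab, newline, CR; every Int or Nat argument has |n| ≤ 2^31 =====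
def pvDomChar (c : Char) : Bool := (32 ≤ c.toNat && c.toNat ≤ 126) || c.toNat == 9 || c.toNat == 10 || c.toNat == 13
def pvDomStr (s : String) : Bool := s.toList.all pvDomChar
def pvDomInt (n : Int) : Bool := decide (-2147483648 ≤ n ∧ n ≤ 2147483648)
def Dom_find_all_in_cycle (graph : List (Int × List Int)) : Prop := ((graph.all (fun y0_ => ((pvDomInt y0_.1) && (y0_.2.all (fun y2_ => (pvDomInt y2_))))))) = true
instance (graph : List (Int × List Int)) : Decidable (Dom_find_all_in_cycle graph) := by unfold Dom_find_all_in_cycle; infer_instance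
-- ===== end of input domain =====

-- B replaces the recursive bridge-finding dfs/find_bridges pair by one function with an
-- iterative DFS over an explicit stack of (vertex, parent, depth, neighbor-index) frames,
-- builds the cycle set from the keys up front and prunes it with difference_update, and
-- produces the output with a list comprehension (A appends inside an explicit loop).

-- ---------- CPython set-order emulation (`set(dict)`, `add`, `difference_update`) ----------
-- Both Pythons iterate a CPython set of ints, so both ports need its exact iteration order.
-- Exact emulation of CPython 3.11 set internals (open addressing, LINEAR_PROBES=9,
-- PERTURB_SHIFT=5, presize from dict, growth *4, dummy cleanup after difference_update),
-- validated against CPython on >10^6 random cases.  int hash = the value itself (-1 ↦ -2),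
-- exact for |n| ≤ 2^31.
inductive PvSlot
  | unused
  | dummy
  | active (k : Int)
deriving Repr, DecidableEq

def pvHash (n : Int) : Int := if n = -1 then -2 else n

def pvSlotGet (t : List PvSlot) (j : Nat) : PvSlot := t.getD j .unused

-- linear scan of `cnt` slots from j for an add: first component:
-- none = continue probing, some none = key already present, some (some j) = unused slot j;
-- second component: first dummy slot seen in this scan, if any.
def pvScanAdd (t : List PvSlot) (key : Int) (j : Nat) : Nat → Option (Option Nat) × Option Nat
  | 0 => (none, none)
  | c + 1 =>
    match pvSlotGet t j with
    | .unused => (some (some j), none)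
    | .dummy =>
      let r := pvScanAdd t key (j + 1) c
      (r.1, some j)
    | .active k =>
      if k = key then (some none, none) else pvScanAdd t key (j + 1) c

-- outer probe loop for add: returns none if the key is already present,
-- some (slot, reusedDummy) otherwise.  The perturb `p` is the 64-bit unsigned hash.
def pvAddLoop (t : List PvSlot) (mask : Nat) (key : Int) (i p : Nat) (free : Option Nat) :
    Nat → Option (Nat × Bool)
  | 0 => none  -- fuel exhausted: unreachable (the probe sequence covers the whole table)
  | f + 1 =>
    let probes := if i + 9 ≤ mask then 9 else 0
    let r := pvScanAdd t key i (probes + 1)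
    let free' := match free with | some x => some x | none => r.2
    match r.1 with
    | some none => none
    | some (some j) =>
      match free' with
      | some fj => some (fj, true)
      | none => some (j, false)
    | none =>
      let p' := p / 32
      pvAddLoop t mask key ((i * 5 + 1 + p') &&& mask) p' free' f

structure PvTable where
  slots : List PvSlot
  fill : Nat
  used : Nat
deriving Repr, DecidableEq

def pvNewSizeGo : Nat → Nat → Nat → Nat
  | 0, sz, _ => sz
  | f + 1, sz, minused => if sz ≤ minused then pvNewSizeGo f (sz * 2) minused else sz

def pvNewSize (minused : Nat) : Nat := pvNewSizeGo 100 8 minused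

def pvScanClean (t : List PvSlot) (j : Nat) : Nat → Option Nat
  | 0 => none
  | c + 1 => if pvSlotGet t j = .unused then some j else pvScanClean t (j + 1) c

def pvCleanLoop (t : List PvSlot) (mask : Nat) (i p : Nat) : Nat → Nat
  | 0 => 0  -- fuel exhausted: unreachable
  | f + 1 =>
    let probes := if i + 9 ≤ mask then 9 else 0
    match pvScanClean t i (probes + 1) with
    | some j => j
    | none =>
      let p' := p / 32
      pvCleanLoop t mask ((i * 5 + 1 + p') &&& mask) p' f

def pvInsertClean (t : List PvSlot) (key : Int) : List PvSlot :=
  let mask := t.length - 1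
  let h := pvHash key
  let i := (PySem.Int.band h (mask : Int)).toNat
  let p := (PySem.Int.mod h 18446744073709551616).toNat
  t.set (pvCleanLoop t mask i p (t.length * 2 + 80)) (.active key)

def pvResize (st : PvTable) (minused : Nat) : PvTable :=
  let ns := pvNewSize minused
  let actives := st.slots.filterMap (fun s => match s with | .active k => some k | _ => none)
  ⟨actives.foldl pvInsertClean (List.replicate ns .unused), st.used, st.used⟩

def pvSetAdd (st : PvTable) (key : Int) : PvTable :=
  let mask := st.slots.length - 1
  let h := pvHash key
  let i := (PySem.Int.band h (mask : Int)).toNat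
  let p := (PySem.Int.mod h 18446744073709551616).toNat
  match pvAddLoop st.slots mask key i p none (st.slots.length * 2 + 80) with
  | none => st
  | some (j, reused) =>
    let slots := st.slots.set j (.active key)
    if reused then ⟨slots, st.fill, st.used + 1⟩
    else
      let st' : PvTable := ⟨slots, st.fill + 1, st.used + 1⟩
      if st'.fill * 5 ≥ mask * 3 then
        pvResize st' (if st'.used > 50000 then st'.used * 2 else st'.used * 4)
      else st'

-- linear scan for discard: some none = not present, some (some j) = found at j, none = continue
def pvScanDisc (t : List PvSlot) (key : Int) (j : Nat) : Nat → Option (Option Nat)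
  | 0 => none
  | c + 1 =>
    match pvSlotGet t j with
    | .unused => some none
    | .dummy => pvScanDisc t key (j + 1) c
    | .active k => if k = key then some (some j) else pvScanDisc t key (j + 1) c

def pvDiscLoop (t : List PvSlot) (mask : Nat) (key : Int) (i p : Nat) : Nat → Option Nat
  | 0 => none  -- fuel exhausted: unreachable
  | f + 1 =>
    let probes := if i + 9 ≤ mask then 9 else 0
    match pvScanDisc t key i (probes + 1) with
    | some r => r
    | none =>
      let p' := p / 32
      pvDiscLoop t mask key ((i * 5 + 1 + p') &&& mask) p' f

def pvSetDiscard (st : PvTable) (key : Int) : PvTable :=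
  let mask := st.slots.length - 1
  let h := pvHash key
  let i := (PySem.Int.band h (mask : Int)).toNat
  let p := (PySem.Int.mod h 18446744073709551616).toNat
  match pvDiscLoop st.slots mask key i p (st.slots.length * 2 + 80) with
  | none => st
  | some j => ⟨st.slots.set j .dummy, st.fill, st.used - 1⟩

-- set(dict) presizes from the dict's length
def pvSetOfKeys (keys : List Int) : PvTable :=
  let st0 : PvTable := ⟨List.replicate 8 .unused, 0, 0⟩
  let st1 := if (st0.fill + keys.length) * 5 ≥ 7 * 3 then pvResize st0 ((st0.used + keys.length) * 2) else st0
  keys.foldl pvSetAdd st1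

-- s.difference_update(edges) (with the dummy-cleanup resize CPython does afterwards)
def pvDiffUpdate (s : PvTable) (edges : List Int) : PvTable :=
  let s := edges.foldl pvSetDiscard s
  if s.fill - s.used > (s.slots.length - 1) / 4 then
    pvResize s (if s.used > 50000 then s.used * 2 else s.used * 4)
  else s

-- iterating a CPython set = its active slots in table order
def pvSetElems (s : PvTable) : List Int :=
  s.slots.filterMap (fun sl => match sl with | .active k => some k | _ => none)

-- ---------- DFS state (visited/low/reach dicts and the growing edges list) ----------
structure PvSt where
  visited : PySem.Dict Int Bool
  low : PySem.Dict Int Int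
  reach : PySem.Dict Int Int
  edges : List Int
deriving Repr, DecidableEq

-- ===== PORT A =====
-- A-side helpers: the three statement groups of the recursive dfs
-- visited[v]=True; low[v]=depth; reach[v]=depth
def pvMark (v d : Int) (st : PvSt) : PvSt :=
  { st with visited := st.visited.insert v true,
            low := st.low.insert v d,
            reach := st.reach.insert v d }

-- low[v] = min(low[v], reach[w])
def pvLowMin (v w : Int) (st : PvSt) : PvSt :=
  { st with low := st.low.insert v (min (st.low.getD v (-1)) (st.reach.getD w (-1))) }

-- low[p] = min(low[p], low[c]); if low[c] > reach[p]: edges.append(c)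
def pvParent (p c : Int) (st : PvSt) : PvSt :=
  let low' := st.low.insert p (min (st.low.getD p (-1)) (st.low.getD c (-1)))
  { st with low := low',
            edges := if low'.getD c (-1) > st.reach.getD p (-1) then st.edges ++ [c] else st.edges }

-- {v: False for v in graph}, {v: -1 for v in graph}, …, edges = []
def pvInitSt (g : PySem.Dict Int (List Int)) : PvSt :=
  ⟨g.keys.foldl (fun d v => d.insert v false) .empty,
   g.keys.foldl (fun d v => d.insert v (-1)) .empty,
   g.keys.foldl (fun d v => d.insert v (-1)) .empty,
   []⟩

-- dfs(graph, u, v, visited, low, reach, edges, depth):  pvDfsA marks v then walks graph[v];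
-- the fuel only guards totality (each nested call turns one False entry of visited to True,
-- so the nesting depth never exceeds the number of keys and the fuel is never exhausted).
mutual
def pvDfsA (g : PySem.Dict Int (List Int)) (fuel : Nat) (u v : Int) (st : PvSt) (d : Int) : PvSt :=
  pvLoopA g fuel u v d (g.getD v []) (pvMark v d st)
termination_by (fuel, 2, 0)

def pvLoopA (g : PySem.Dict Int (List Int)) (fuel : Nat) (u v d : Int) (xs : List Int) (st : PvSt) : PvSt :=
  match xs with
  | [] => st
  | w :: tl =>
    if w = u then pvLoopA g fuel u v d tl st
    else
      match st.visited.get? w with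
      | none => st                                   -- KeyError in Python (outside Pre_)
      | some true => pvLoopA g fuel u v d tl (pvLowMin v w st)
      | some false =>
        match fuel with
        | 0 => st                                    -- unreachable, see comment above
        | f + 1 => pvLoopA g (f + 1) u v d tl (pvParent v w (pvDfsA g f v w st (d + 1)))
termination_by (fuel, 1, xs.length)
end

-- find_bridges(graph)
def pvBridgesA (g : PySem.Dict Int (List Int)) : List Int :=
  (g.keys.foldl
    (fun st root =>
      match st.visited.get? root with
      | some false => pvDfsA g g.keys.length root root st 0
      | _ => st)
    (pvInitSt g)).edges

-- edges = find_bridges(graph); cycles = graph.keys() - edges;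
-- for x in cycles: if len(graph[x]) > 0: true_cycles.append(x)
def find_all_in_cycle (graph : List (Int × List Int)) : List Int :=
  let g := PySem.Dict.ofList graph
  let edges := pvBridgesA g
  let cycles := pvSetElems (pvDiffUpdate (pvSetOfKeys g.keys) edges)
  cycles.foldl (fun acc x => if (g.getD x []).length > 0 then acc ++ [x] else acc) []

-- ===== PORT B =====
-- number of False entries in visited; only drives pvStepB's termination measure
def pvFcount (d : PySem.Dict Int Bool) : Nat := d.values.count false

-- the count of False entries shrinks strictly when a False key is set to True
theorem pvCountMapLe (k : Int) (l : List (Int × Bool)) :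
    (l.map (fun p => (if p.1 = k then ((k:Int), true) else p).2)).count false ≤
      (l.map (·.2)).count false := by
  induction l with
  | nil => simp
  | cons p tl ih =>
    simp only [List.map_cons, List.count_cons]
    by_cases h : p.1 = k <;> simp [h] <;> omega

theorem pvCountMapLt (k : Int) (l : List (Int × Bool)) (hm : (k, false) ∈ l) :
    (l.map (fun p => (if p.1 = k then ((k:Int), true) else p).2)).count false <
      (l.map (·.2)).count false := by
  induction l with
  | nil => simp at hm
  | cons p tl ih =>
    simp only [List.map_cons, List.count_cons]
    rcases List.mem_cons.mp hm with h | h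
    · subst h
      have := pvCountMapLe k tl
      simp
      omega
    · have := ih h
      by_cases hp : p.1 = k <;> simp [hp] <;> omega

theorem pvFcount_insert_true_lt (d : PySem.Dict Int Bool) (k : Int)
    (h : d.get? k = some false) : pvFcount (d.insert k true) < pvFcount d := by
  have hc : d.contains k := by
    rw [PySem.Dict.contains_eq_isSome_get?, h]; rfl
  have hm : (k, false) ∈ d.items := PySem.Dict.mem_items_of_get?_eq_some d h
  unfold pvFcount
  rw [PySem.Dict.values, PySem.Dict.values, PySem.Dict.items_insert_of_contains _ _ hc,
    List.map_map]
  simpa [Function.comp_def] using pvCountMapLt k d.items hm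

-- the while-stack loop of B: one frame = (vertex, parent, its depth, next neighbour index)
def pvStepB (g : PySem.Dict Int (List Int)) (stack : List (Int × Int × Int × Nat)) (st : PvSt) : PvSt :=
  match stack with
  | [] => st
  | (v, u, d, i) :: rest =>
    if hi : i < (g.getD v []).length then
      if (g.getD v [])[i] = u then pvStepB g ((v, u, d, i + 1) :: rest) st
      else
        match hw : st.visited.get? (g.getD v [])[i] with
        | none => st                                 -- KeyError in Python (outside Pre_)
        | some true =>
          pvStepB g ((v, u, d, i + 1) :: rest)
            { st with low := st.low.insert v (min (st.low.getD v (-1)) (st.reach.getD (g.getD v [])[i] (-1))) }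
        | some false =>
          pvStepB g (((g.getD v [])[i], v, d + 1, 0) :: (v, u, d, i + 1) :: rest)
            { st with visited := st.visited.insert (g.getD v [])[i] true,
                      low := st.low.insert (g.getD v [])[i] (d + 1),
                      reach := st.reach.insert (g.getD v [])[i] (d + 1) }
    else
      pvStepB g rest
        (match rest with
         | [] => st
         | (p, _, _, _) :: _ =>
           let low' := st.low.insert p (min (st.low.getD p (-1)) (st.low.getD v (-1)))
           ({ st with low := low',
                      edges := if low'.getD v (-1) > st.reach.getD p (-1) then st.edges ++ [v] else st.edges } : PvSt))
termination_by
  (pvFcount st.visited, (stack.map (fun f => (g.getD f.1 []).length - f.2.2.2)).sum, stack.length)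
decreasing_by
  · apply Prod.Lex.right'
    · simp
    · apply Prod.Lex.left; simp; omega
  · apply Prod.Lex.right'
    · simp
    · apply Prod.Lex.left; simp; omega
  · apply Prod.Lex.left
    exact pvFcount_insert_true_lt _ _ hw
  · apply Prod.Lex.right'
    · rcases rest with _ | ⟨⟨p, pu, pd, pi⟩, tl⟩ <;> simp
    · apply Prod.Lex.right'
      · simp
      · simp

-- the whole of Source B in one definition, mirroring its single-function layout
def find_all_in_cycle_alt (graph : List (Int × List Int)) : List Int :=
  let g := PySem.Dict.ofList graph
  let cycles0 := pvSetOfKeys g.keys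
  let stF :=
    g.keys.foldl
      (fun (st : PvSt) (root : Int) =>
        match st.visited.get? root with
        | some false =>
          pvStepB g [(root, root, 0, 0)]
            { st with visited := st.visited.insert root true,
                      low := st.low.insert root 0,
                      reach := st.reach.insert root 0 }
        | _ => st)
      (⟨g.keys.foldl (fun d v => d.insert v false) .empty,
        g.keys.foldl (fun d v => d.insert v (-1)) .empty,
        g.keys.foldl (fun d v => d.insert v (-1)) .empty,
        []⟩ : PvSt)
  (pvSetElems (pvDiffUpdate cycles0 stF.edges)).filter
    (fun x => 0 < (g.getD x []).length)

-- ===== PRECONDITION & SPEC =====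
-- Pre_ excludes exactly the graphs whose adjacency lists mention a vertex that is not a key of
-- the dict: there Python's `visited[edge]` raises KeyError (in A and in B alike).
def Pre_find_all_in_cycle (graph : List (Int × List Int)) : Prop :=
  ∀ ns ∈ (PySem.Dict.ofList graph).values, ∀ w ∈ ns, w ∈ (PySem.Dict.ofList graph).keys

instance (graph : List (Int × List Int)) : Decidable (Pre_find_all_in_cycle graph) := by
  unfold Pre_find_all_in_cycle; infer_instance

def pvWitness_find_all_in_cycle : (List (Int × List Int)) := [(0, [1]), (1, [0])]

def Spec_find_all_in_cycle (graph : List (Int × List Int)) (out : List Int) : Prop :=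
  out = find_all_in_cycle_alt graph

instance (graph : List (Int × List Int)) (out : List Int) : Decidable (Spec_find_all_in_cycle graph out) := by
  unfold Spec_find_all_in_cycle; infer_instance

-- ===== CLAIM (what is proved, stated in full; the proofs are below) =====
def Claim_equal_find_all_in_cycle : Prop :=
  ∀ (graph : List (Int × List Int)), Dom_find_all_in_cycle graph →
    Pre_find_all_in_cycle graph →
    Spec_find_all_in_cycle graph (find_all_in_cycle graph)

-- ===== LEMMAS AND PROOFS =====

theorem pvFcount_insert_true_le (d : PySem.Dict Int Bool) (k : Int) :
    pvFcount (d.insert k true) ≤ pvFcount d := by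
  unfold pvFcount
  by_cases hc : d.contains k
  · rw [PySem.Dict.values, PySem.Dict.values, PySem.Dict.items_insert_of_contains _ _ hc,
      List.map_map]
    simpa [Function.comp_def] using pvCountMapLe k d.items
  · rw [PySem.Dict.values, PySem.Dict.values,
      PySem.Dict.items_insert_of_not_contains _ _ (by simpa using hc)]
    simp

-- the pop-update of pvStepB, named for the proofs (pvStepB inlines it)
def pvPopUpd (v : Int) (rest : List (Int × Int × Int × Nat)) (st : PvSt) : PvSt :=
  match rest with
  | [] => st
  | (p, _, _, _) :: _ => pvParent p v st

theorem pvVisited_mark (v d : Int) (st : PvSt) :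
    (pvMark v d st).visited = st.visited.insert v true := rfl

theorem pvFcount_pos (d : PySem.Dict Int Bool) (k : Int) (h : d.get? k = some false) :
    1 ≤ pvFcount d := by
  have hm : (k, false) ∈ d.items := PySem.Dict.mem_items_of_get?_eq_some d h
  have : false ∈ d.values := by
    rw [PySem.Dict.values]
    exact List.mem_map.mpr ⟨(k, false), hm, rfl⟩
  exact List.count_pos_iff.mpr this

theorem pvKeys_mark (v d : Int) (st : PvSt) (b : Bool)
    (h : st.visited.get? v = some b) :
    (pvMark v d st).visited.keys = st.visited.keys := by
  rw [pvVisited_mark]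
  exact PySem.Dict.keys_insert_of_contains _ _
    (by rw [PySem.Dict.contains_eq_isSome_get?, h]; rfl)

-- one-step unfoldings of the B-side machine, in A's helper vocabulary (the bodies are defeq)
theorem pvStepB_nil (g : PySem.Dict Int (List Int)) (st : PvSt) : pvStepB g [] st = st := by
  rw [pvStepB.eq_def]

theorem pvStepB_skip (g : PySem.Dict Int (List Int)) (v u d : Int) (i : Nat)
    (rest : List (Int × Int × Int × Nat)) (st : PvSt)
    (hi : i < (g.getD v []).length) (he : (g.getD v [])[i] = u) :
    pvStepB g ((v, u, d, i) :: rest) st = pvStepB g ((v, u, d, i + 1) :: rest) st := by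
  conv_lhs => rw [pvStepB.eq_def]
  simp only [dif_pos hi, if_pos he]

theorem pvStepB_none (g : PySem.Dict Int (List Int)) (v u d : Int) (i : Nat)
    (rest : List (Int × Int × Int × Nat)) (st : PvSt)
    (hi : i < (g.getD v []).length) (hne : ¬(g.getD v [])[i] = u)
    (hw : st.visited.get? (g.getD v [])[i] = none) :
    pvStepB g ((v, u, d, i) :: rest) st = st := by
  conv_lhs => rw [pvStepB.eq_def]
  simp only [dif_pos hi, if_neg hne]
  split <;> simp_all

theorem pvStepB_true (g : PySem.Dict Int (List Int)) (v u d : Int) (i : Nat)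
    (rest : List (Int × Int × Int × Nat)) (st : PvSt)
    (hi : i < (g.getD v []).length) (hne : ¬(g.getD v [])[i] = u)
    (hw : st.visited.get? (g.getD v [])[i] = some true) :
    pvStepB g ((v, u, d, i) :: rest) st =
      pvStepB g ((v, u, d, i + 1) :: rest) (pvLowMin v (g.getD v [])[i] st) := by
  conv_lhs => rw [pvStepB.eq_def]
  simp only [dif_pos hi, if_neg hne]
  split <;> simp_all [pvLowMin]

theorem pvStepB_false (g : PySem.Dict Int (List Int)) (v u d : Int) (i : Nat)
    (rest : List (Int × Int × Int × Nat)) (st : PvSt)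
    (hi : i < (g.getD v []).length) (hne : ¬(g.getD v [])[i] = u)
    (hw : st.visited.get? (g.getD v [])[i] = some false) :
    pvStepB g ((v, u, d, i) :: rest) st =
      pvStepB g (((g.getD v [])[i], v, d + 1, 0) :: (v, u, d, i + 1) :: rest)
        (pvMark (g.getD v [])[i] (d + 1) st) := by
  conv_lhs => rw [pvStepB.eq_def]
  simp only [dif_pos hi, if_neg hne]
  split <;> simp_all [pvMark]

theorem pvStepB_pop (g : PySem.Dict Int (List Int)) (v u d : Int) (i : Nat)
    (rest : List (Int × Int × Int × Nat)) (st : PvSt)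
    (hi : ¬i < (g.getD v []).length) :
    pvStepB g ((v, u, d, i) :: rest) st = pvStepB g rest (pvPopUpd v rest st) := by
  conv_lhs => rw [pvStepB.eq_def]
  simp only [dif_neg hi]
  rcases rest with _ | ⟨⟨p, pu, pd, pi⟩, tl⟩ <;> simp [pvPopUpd, pvParent]

-- keys of visited are preserved and the false-count never grows along the machine
theorem pvPres (g : PySem.Dict Int (List Int)) :
    ∀ stack st, st.visited.keys = g.keys →
      (pvStepB g stack st).visited.keys = g.keys ∧
      pvFcount (pvStepB g stack st).visited ≤ pvFcount st.visited := by
  intro stack st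
  induction stack, st using pvStepB.induct g with
  | case1 st => intro h; rw [pvStepB_nil]; exact ⟨h, le_refl _⟩
  | case2 st p fst snd tail h ih =>
    intro hk
    rw [pvStepB_skip _ _ _ _ _ _ _ h rfl]
    exact ih hk
  | case3 st p u d snd tail h hne hw =>
    intro hk
    rw [pvStepB_none _ _ _ _ _ _ _ h hne hw]
    exact ⟨hk, le_refl _⟩
  | case4 st p u d snd tail h hne hw ih =>
    intro hk
    rw [pvStepB_true _ _ _ _ _ _ _ h hne hw]
    exact ih hk
  | case5 st p u d snd tail h hne hw ih =>
    intro hk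
    rw [pvStepB_false _ _ _ _ _ _ _ h hne hw]
    have hkm : (pvMark (g.getD p [])[snd] (d + 1) st).visited.keys = g.keys := by
      rw [pvKeys_mark _ _ _ _ hw]; exact hk
    obtain ⟨h1, h2⟩ := ih hkm
    refine ⟨h1, le_trans h2 ?_⟩
    show pvFcount (st.visited.insert (g.getD p [])[snd] true) ≤ pvFcount st.visited
    exact pvFcount_insert_true_le _ _
  | case6 st p u d snd tail h ih =>
    intro hk
    rw [pvStepB_pop _ _ _ _ _ _ _ h]
    rcases tail with _ | ⟨⟨q, qu, qd, qi⟩, tl⟩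
    · exact ih hk
    · obtain ⟨h1, h2⟩ := ih (show (pvParent q p st).visited.keys = g.keys from hk)
      exact ⟨h1, h2⟩

-- A-side recursion replayed over a frame stack (proof-side only)
def pvFinishA (g : PySem.Dict Int (List Int)) : List (Int × Int × Int × Nat) → PvSt → PvSt
  | [], st => st
  | (v, u, d, i) :: rest, st =>
    pvFinishA g rest
      (pvPopUpd v rest (pvLoopA g (g.keys.length - d.toNat) u v d ((g.getD v []).drop i) st))

-- stack well-formedness: each frame's parent is the vertex below it, depths descend to 0
def pvChain : List (Int × Int × Int × Nat) → Prop
  | [] => True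
  | [f] => f.2.2.1 = 0
  | f :: f' :: rest => f.2.1 = f'.1 ∧ f.2.2.1 = f'.2.2.1 + 1 ∧ pvChain (f' :: rest)

def pvTopD : List (Int × Int × Int × Nat) → Int
  | [] => 0
  | f :: _ => f.2.2.1

theorem pvChain_idx (v u d : Int) (i j : Nat) (tail : List (Int × Int × Int × Nat)) :
    pvChain ((v, u, d, i) :: tail) ↔ pvChain ((v, u, d, j) :: tail) := by
  rcases tail with _ | ⟨f, tl⟩ <;> simp [pvChain]

theorem pvChain_d_nonneg : ∀ (f : Int × Int × Int × Nat) (rest : List (Int × Int × Int × Nat)),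
    pvChain (f :: rest) → 0 ≤ f.2.2.1 := by
  intro f rest
  induction rest generalizing f with
  | nil => intro h; simp [pvChain] at h; omega
  | cons f' tl ih =>
    intro h
    simp only [pvChain] at h
    have := ih f' h.2.2
    omega

-- one-step unfoldings of the A-side loop
theorem pvLoopA_nil (g : PySem.Dict Int (List Int)) (fuel : Nat) (u v d : Int) (st : PvSt) :
    pvLoopA g fuel u v d [] st = st := by
  conv_lhs => rw [pvLoopA.eq_def]

theorem pvLoopA_cons_skip (g : PySem.Dict Int (List Int)) (fuel : Nat) (u v d w : Int)
    (tl : List Int) (st : PvSt) (h : w = u) :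
    pvLoopA g fuel u v d (w :: tl) st = pvLoopA g fuel u v d tl st := by
  conv_lhs => rw [pvLoopA.eq_def]
  simp [h]

theorem pvLoopA_cons_true (g : PySem.Dict Int (List Int)) (fuel : Nat) (u v d w : Int)
    (tl : List Int) (st : PvSt) (hne : ¬w = u) (hw : st.visited.get? w = some true) :
    pvLoopA g fuel u v d (w :: tl) st = pvLoopA g fuel u v d tl (pvLowMin v w st) := by
  conv_lhs => rw [pvLoopA.eq_def]
  simp only [if_neg hne]
  split <;> simp_all

theorem pvLoopA_cons_false (g : PySem.Dict Int (List Int)) (f : Nat) (u v d w : Int)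
    (tl : List Int) (st : PvSt) (hne : ¬w = u) (hw : st.visited.get? w = some false) :
    pvLoopA g (f + 1) u v d (w :: tl) st =
      pvLoopA g (f + 1) u v d tl (pvParent v w (pvDfsA g f v w st (d + 1))) := by
  conv_lhs => rw [pvLoopA.eq_def]
  simp only [if_neg hne]
  split <;> simp_all

theorem pvDfsA_def (g : PySem.Dict Int (List Int)) (fuel : Nat) (u v : Int) (st : PvSt) (d : Int) :
    pvDfsA g fuel u v st d = pvLoopA g fuel u v d (g.getD v []) (pvMark v d st) := by
  rw [pvDfsA.eq_def]

-- the iterative machine replays the recursive DFS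
theorem pvSim (g : PySem.Dict Int (List Int))
    (hg : ∀ ns ∈ g.values, ∀ w ∈ ns, w ∈ g.keys) :
    ∀ stack st, pvChain stack → st.visited.keys = g.keys →
      pvFcount st.visited + (pvTopD stack).toNat ≤ g.keys.length →
      pvStepB g stack st = pvFinishA g stack st := by
  intro stack st
  induction stack, st using pvStepB.induct g with
  | case1 st => intro _ _ _; exact pvStepB_nil g st
  | case2 st p d snd tail h ih =>
    -- w = u: skip the parent edge
    intro hc hk hf
    rw [pvStepB_skip _ _ _ _ _ _ _ h rfl]
    refine Eq.trans (ih ((pvChain_idx _ _ _ _ _ _).mp hc) hk hf) ?_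
    conv_lhs => rw [pvFinishA]
    conv_rhs => rw [pvFinishA]
    rw [List.drop_eq_getElem_cons h, pvLoopA_cons_skip _ _ _ _ _ _ _ _ rfl]
  | case3 st p u d snd tail h hne hw =>
    -- KeyError case: impossible under Pre_
    intro hc hk hf
    exfalso
    have hwk : (g.getD p [])[snd] ∈ g.keys := by
      by_cases hcp : g.contains p
      · have hsome : (g.get? p).isSome = true := by
          rw [← PySem.Dict.contains_eq_isSome_get?]; exact hcp
        obtain ⟨ns, hns⟩ := Option.isSome_iff_exists.mp hsome
        have hmem : ns ∈ g.values := by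
          rw [PySem.Dict.values]
          exact List.mem_map.mpr ⟨(p, ns), PySem.Dict.mem_items_of_get?_eq_some g hns, rfl⟩
        have hgd : g.getD p [] = ns := PySem.Dict.getD_of_get?_eq_some g [] hns
        exact hg ns hmem _ (by rw [← hgd]; exact List.getElem_mem h)
      · have : g.getD p [] = [] :=
          PySem.Dict.getD_of_not_contains _ _ (by simpa using hcp)
        rw [this] at h; simp at h
    have hnone := (PySem.Dict.get?_eq_none_iff_not_mem_keys st.visited _).mp hw
    rw [hk] at hnone
    exact hnone hwk
  | case4 st p u d snd tail h hne hw ih =>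
    -- already-visited neighbour: low[v] = min(low[v], reach[w])
    intro hc hk hf
    rw [pvStepB_true _ _ _ _ _ _ _ h hne hw]
    refine Eq.trans (ih ((pvChain_idx _ _ _ _ _ _).mp hc) hk hf) ?_
    conv_lhs => rw [pvFinishA]
    conv_rhs => rw [pvFinishA]
    rw [List.drop_eq_getElem_cons h, pvLoopA_cons_true _ _ _ _ _ _ _ _ hne hw]
    rfl
  | case5 st p u d snd tail h hne hw ih =>
    -- unvisited neighbour: push a child frame / recursive dfs call
    intro hc hk hf
    rw [pvStepB_false _ _ _ _ _ _ _ h hne hw]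
    have hd0 : 0 ≤ d := pvChain_d_nonneg (p, u, d, snd) tail hc
    simp only [pvTopD] at hf
    have h1 : 1 ≤ pvFcount st.visited := pvFcount_pos _ _ hw
    have hlt : pvFcount (st.visited.insert (g.getD p [])[snd] true) < pvFcount st.visited :=
      pvFcount_insert_true_lt _ _ hw
    refine Eq.trans (ih ⟨rfl, rfl, (pvChain_idx _ _ _ _ _ _).mp hc⟩
      ((pvKeys_mark _ _ _ _ hw).trans hk)
      (show pvFcount (st.visited.insert (g.getD p [])[snd] true) + (d + 1).toNat ≤ g.keys.length by
        omega)) ?_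
    -- pvFinishA on the pushed stack equals pvFinishA on the original stack
    conv_lhs => rw [pvFinishA]
    simp only [pvPopUpd, List.drop_zero]
    conv_lhs => rw [pvFinishA]
    conv_rhs => rw [pvFinishA]
    have hfuel : g.keys.length - d.toNat = (g.keys.length - (d + 1).toNat) + 1 := by omega
    rw [List.drop_eq_getElem_cons h, hfuel,
      pvLoopA_cons_false _ _ _ _ _ _ _ _ hne hw, pvDfsA_def]
    rfl
  | case6 st p u d snd tail h ih =>
    -- neighbours exhausted: pop the frame, update the parent
    intro hc hk hf
    rw [pvStepB_pop _ _ _ _ _ _ _ h]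
    simp only [pvTopD] at hf
    rcases tail with _ | ⟨⟨q, qu, qd, qi⟩, tl⟩
    · -- bottom frame: machine and recursion both stop
      rw [show pvPopUpd p [] st = st from rfl, pvStepB_nil]
      conv_rhs => rw [pvFinishA]
      rw [List.drop_eq_nil_iff.mpr (by omega), pvLoopA_nil]
      rfl
    · -- pop onto the parent frame
      have hcc : pvChain ((p, u, d, snd) :: (q, qu, qd, qi) :: tl) := hc
      simp only [pvChain] at hcc
      have hnn := pvChain_d_nonneg (q, qu, qd, qi) tl hcc.2.2
      have hd : d = qd + 1 := hcc.2.1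
      refine Eq.trans (ih hcc.2.2
        (show (pvParent q p st).visited.keys = g.keys from hk)
        (show pvFcount (pvParent q p st).visited + (pvTopD ((q, qu, qd, qi) :: tl)).toNat ≤ g.keys.length by
          show pvFcount st.visited + qd.toNat ≤ g.keys.length
          omega)) ?_
      conv_rhs => rw [pvFinishA]
      rw [List.drop_eq_nil_iff.mpr (by omega), pvLoopA_nil]
      rfl

theorem pvInit_keys (g : PySem.Dict Int (List Int)) (hnd : g.keys.Nodup) :
    (pvInitSt g).visited.keys = g.keys := by
  have hv : (pvInitSt g).visited =
      g.keys.foldl (fun d v => d.insert v false) PySem.Dict.empty := rfl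
  rw [hv, PySem.Dict.keys_foldl_insert g.keys (fun _ _ => false) PySem.Dict.empty,
    PySem.Dict.keys_empty, PySem.Set.update_nil_left]
  exact PySem.Set.ofList_eq_self_of_nodup _ hnd

theorem pvFcount_le_len (d : PySem.Dict Int Bool) : pvFcount d ≤ d.keys.length := by
  unfold pvFcount
  calc d.values.count false ≤ d.values.length := List.count_le_length
    _ = d.keys.length := by rw [PySem.Dict.values, PySem.Dict.keys]; simp

theorem pvFold_eq (g : PySem.Dict Int (List Int))
    (hg : ∀ ns ∈ g.values, ∀ w ∈ ns, w ∈ g.keys) :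
    ∀ (l : List Int) (st : PvSt), st.visited.keys = g.keys →
      pvFcount st.visited ≤ g.keys.length →
      l.foldl (fun st root =>
        match st.visited.get? root with
        | some false => pvDfsA g g.keys.length root root st 0
        | _ => st) st =
      l.foldl (fun st root =>
        match st.visited.get? root with
        | some false => pvStepB g [(root, root, 0, 0)] (pvMark root 0 st)
        | _ => st) st := by
  intro l
  induction l with
  | nil => intro st _ _; rfl
  | cons root tl ih =>
    intro st hk hfc
    rw [List.foldl_cons, List.foldl_cons]
    rcases hrv : st.visited.get? root with _ | b
    · simp only []; exact ih st hk hfc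
    · cases b
      · -- unvisited root: one full DFS
        simp only []
        have hkm : (pvMark root 0 st).visited.keys = g.keys := by
          rw [pvKeys_mark _ _ _ _ hrv]; exact hk
        have hstep : pvStepB g [(root, root, 0, 0)] (pvMark root 0 st) =
            pvDfsA g g.keys.length root root st 0 := by
          rw [pvSim g hg [(root, root, 0, 0)] (pvMark root 0 st)
            (by simp [pvChain]) hkm
            (by
              simp only [pvTopD]
              have := pvFcount_insert_true_le st.visited root
              rw [pvVisited_mark]
              omega)]
          rw [pvFinishA, pvFinishA]
          simp only [pvPopUpd, List.drop_zero]
          rw [pvDfsA_def]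
          norm_num
        rw [← hstep]
        obtain ⟨hk', hfc'⟩ := pvPres g [(root, root, 0, 0)] (pvMark root 0 st) hkm
        refine ih _ hk' ?_
        calc pvFcount (pvStepB g [(root, root, 0, 0)] (pvMark root 0 st)).visited
            ≤ pvFcount (pvMark root 0 st).visited := hfc'
          _ ≤ pvFcount st.visited := by
              rw [pvVisited_mark]; exact pvFcount_insert_true_le _ _
          _ ≤ g.keys.length := hfc
      · simp only []; exact ih st hk hfc

-- the two ports compute the same bridge list
theorem pvBridges_eq (g : PySem.Dict Int (List Int)) (hnd : g.keys.Nodup)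
    (hg : ∀ ns ∈ g.values, ∀ w ∈ ns, w ∈ g.keys) :
    pvBridgesA g =
      (g.keys.foldl
        (fun st root =>
          match st.visited.get? root with
          | some false => pvStepB g [(root, root, 0, 0)] (pvMark root 0 st)
          | _ => st)
        (pvInitSt g)).edges := by
  unfold pvBridgesA
  rw [pvFold_eq g hg g.keys (pvInitSt g) (pvInit_keys g hnd)
    (by rw [← pvInit_keys g hnd]; exact pvFcount_le_len _)]

-- A's append loop over the cycle set is B's comprehension/filter
theorem pvFoldl_append_filter (l : List Int) (p : Int → Prop) [DecidablePred p] (acc : List Int) :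
    l.foldl (fun acc x => if p x then acc ++ [x] else acc) acc =
      acc ++ l.filter (fun x => decide (p x)) := by
  induction l generalizing acc with
  | nil => simp
  | cons x tl ih =>
    rw [List.foldl_cons]
    by_cases h : p x
    · rw [if_pos h, ih, List.filter_cons_of_pos (by simpa using h)]
      simp
    · rw [if_neg h, ih, List.filter_cons_of_neg (by simpa using h)]

-- ===== VERDICT (by name: the statement is the Claim_ definition above) =====
theorem find_all_in_cycle_spec : Claim_equal_find_all_in_cycle := by
  intro graph _ hpre
  unfold Spec_find_all_in_cycle find_all_in_cycle find_all_in_cycle_alt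
  show (pvSetElems (pvDiffUpdate (pvSetOfKeys (PySem.Dict.ofList graph).keys)
          (pvBridgesA (PySem.Dict.ofList graph)))).foldl
        (fun acc x => if ((PySem.Dict.ofList graph).getD x []).length > 0 then acc ++ [x] else acc) [] =
      (pvSetElems (pvDiffUpdate (pvSetOfKeys (PySem.Dict.ofList graph).keys)
          (((PySem.Dict.ofList graph).keys.foldl
            (fun st root =>
              match st.visited.get? root with
              | some false => pvStepB (PySem.Dict.ofList graph) [(root, root, 0, 0)] (pvMark root 0 st)
              | _ => st)
            (pvInitSt (PySem.Dict.ofList graph))).edges))).filter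
        (fun x => decide (0 < ((PySem.Dict.ofList graph).getD x []).length))
  rw [pvBridges_eq _ (PySem.Dict.nodup_keys_ofList graph) hpre, pvFoldl_append_filter]
  simp
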